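-- pv_equiv track=rewrite | github.com/tardatio/s_Predictor | s_predictor/util.py | make_bool
-- ===== SOURCE A (Python) =====
-- def make_bool(up_down):
--     correct, wrong = 0, 0
--     for i in up_down:
--         if i == True:
--             correct +=1
--         else:
--             wrong +=1
--     return [correct, wrong]
-- ===== SOURCE B (Python) =====
-- def make_bool(up_down):
--     # Sort (False < True), then binary-search the first True: its index is the
--     # number of non-True elements; the rest are the correct ones.
--     lst = sorted(up_down)
--     lo, hi = 0, len(lst)
--     while lo < hi:
--         mid = (lo + hi) // 2
--         if lst[mid] == True:
--             hi = mid
--         else: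
--             lo = mid + 1
--     return [len(lst) - lo, lo]
-- ===== Notes on version B (the rewrite author's own statement) =====
-- stated objective: alternative
-- what changed: B replaces A's single linear pass with two parallel counters by a sort-then-binary-search algorithm: after sorting (False before True), the index of the first True found by binary search is the wrong-count and the remainder is the correct-count.
import Mathlib
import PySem

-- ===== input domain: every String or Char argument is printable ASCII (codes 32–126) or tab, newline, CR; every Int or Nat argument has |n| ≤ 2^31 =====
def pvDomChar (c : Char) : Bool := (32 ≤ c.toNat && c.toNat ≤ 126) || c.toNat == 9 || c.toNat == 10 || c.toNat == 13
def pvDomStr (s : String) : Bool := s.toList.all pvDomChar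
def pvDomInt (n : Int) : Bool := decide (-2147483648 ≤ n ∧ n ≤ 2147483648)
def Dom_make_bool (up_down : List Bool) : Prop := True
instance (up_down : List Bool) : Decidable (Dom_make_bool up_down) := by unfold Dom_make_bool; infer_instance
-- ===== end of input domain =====

-- B replaces A's linear two-counter pass by sort-then-binary-search: the index of the
-- first True in the sorted list is the wrong-count (objective: alternative algorithm).

-- ===== PORT A =====
def make_bool (up_down : List Bool) : List Int :=
  let p := up_down.foldl (fun (cw : Int × Int) i =>
    if i = true then (cw.1 + 1, cw.2) else (cw.1, cw.2 + 1)) (0, 0)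
  [p.1, p.2]

-- ===== PORT B =====
-- the while-loop of Source B: binary search for the first index holding True
-- (lst[mid] is always in range when 0 ≤ lo < hi ≤ len lst, so pyGetD is exact here)
def bsFirstTrue (lst : List Bool) (lo hi : Int) : Int :=
  if h : lo < hi then
    if PySem.List.pyGetD lst (PySem.Int.floordiv (lo + hi) 2) false = true then
      bsFirstTrue lst lo (PySem.Int.floordiv (lo + hi) 2)
    else
      bsFirstTrue lst (PySem.Int.floordiv (lo + hi) 2 + 1) hi
  else lo
termination_by (hi - lo).toNat
decreasing_by
  · have h1 : PySem.Int.floordiv (lo + hi) 2 < hi :=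
      (PySem.Int.floordiv_lt_iff_lt_mul (by omega)).mpr (by omega)
    omega
  · have h2 := (PySem.Int.floordiv_two_mid_bounds (le_of_lt h)).1
    omega

def make_bool_alt (up_down : List Bool) : List Int :=
  let lst := PySem.List.sorted up_down (fun x => x) false
  let lo := bsFirstTrue lst 0 (lst.length : Int)
  [(lst.length : Int) - lo, lo]

-- ===== PRECONDITION & SPEC =====
def Spec_make_bool (up_down : List Bool) (out : List Int) : Prop := out = make_bool_alt up_down
instance (up_down : List Bool) (out : List Int) : Decidable (Spec_make_bool up_down out) := by unfold Spec_make_bool; infer_instance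

-- ===== CLAIM (what is proved, stated in full; the proofs are below) =====
def Claim_equal_make_bool : Prop := ∀ (up_down : List Bool), Dom_make_bool up_down → Spec_make_bool up_down (make_bool up_down)

-- ===== LEMMAS AND PROOFS =====

-- A's pair-fold computes (count of True, count of non-True)
theorem pv_fold_pair (l : List Bool) (c w : Int) :
    l.foldl (fun (cw : Int × Int) i =>
      if i = true then (cw.1 + 1, cw.2) else (cw.1, cw.2 + 1)) (c, w)
    = (c + (l.count true : Int), w + (l.count false : Int)) := by
  induction l generalizing c w with
  | nil => simp
  | cons a t ih =>
    cases a <;> simp [ih] <;> ring_nf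

-- the canonical sorted form of a bool list is a perm of it
theorem pv_rep_perm (l : List Bool) :
    (List.replicate (l.count false) false ++ List.replicate (l.count true) true).Perm l := by
  induction l with
  | nil => simp
  | cons a t ih =>
    cases a
    · simpa [List.count_cons, List.replicate_succ] using ih.cons false
    · simp only [List.count_cons]
      simpa [List.replicate_succ] using (List.perm_middle.trans (ih.cons true))

-- sorted(bool list) = Falses then Trues
theorem pv_sorted_eq (l : List Bool) :
    PySem.List.sorted l (fun x => x) false
      = List.replicate (l.count false) false ++ List.replicate (l.count true) true := by
  apply PySem.List.sorted_id_eq_of_perm_of_pairwise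
  · exact pv_rep_perm l
  · refine List.pairwise_append.mpr ⟨?_, ?_, ?_⟩
    · exact (List.pairwise_replicate).2 (Or.inr (le_refl _))
    · exact (List.pairwise_replicate).2 (Or.inr (le_refl _))
    · intro a ha b hb
      rw [List.eq_of_mem_replicate ha, List.eq_of_mem_replicate hb]
      exact Bool.false_le true

-- indexing the canonical form
theorem pv_getD_rep (w c : Nat) (i : Int) (h0 : 0 ≤ i) (h1 : i < (w : Int) + (c : Int)) :
    PySem.List.pyGetD (List.replicate w false ++ List.replicate c true) i false
      = decide ((w : Int) ≤ i) := by
  have hlen : (List.replicate w false ++ List.replicate c true).length = w + c := by simp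
  rw [PySem.List.pyGetD_eq_getElem _ false h0 (by rw [hlen]; omega)]
  by_cases h : i.toNat < w
  · rw [List.getElem_append_left (by simpa using h)]
    simp [List.getElem_replicate]
    omega
  · rw [List.getElem_append_right (by simpa using h)]
    simp [List.getElem_replicate]
    omega

-- the binary search returns w on the canonical form, for any bracketing interval
theorem pv_bs_spec (w c : Nat) : ∀ (n : Nat) (lo hi : Int),
    (hi - lo).toNat ≤ n → 0 ≤ lo → lo ≤ (w : Int) → (w : Int) ≤ hi → hi ≤ (w : Int) + (c : Int) →
    bsFirstTrue (List.replicate w false ++ List.replicate c true) lo hi = (w : Int) := by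
  intro n
  induction n with
  | zero =>
    intro lo hi hn h0 h1 h2 h3
    rw [bsFirstTrue]
    have : ¬ lo < hi := by omega
    simp [this]; omega
  | succ n ih =>
    intro lo hi hn h0 h1 h2 h3
    rw [bsFirstTrue]
    by_cases h : lo < hi
    · have hm1 := (PySem.Int.floordiv_two_mid_bounds (le_of_lt h)).1
      have hm2 : PySem.Int.floordiv (lo + hi) 2 < hi :=
        (PySem.Int.floordiv_lt_iff_lt_mul (by omega)).mpr (by omega)
      set mid := PySem.Int.floordiv (lo + hi) 2 with hmid
      have hget := pv_getD_rep w c mid (by omega) (by omega)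
      simp only [h, dite_true, hget]
      by_cases hw : (w : Int) ≤ mid
      · simp only [hw, decide_true, if_true]
        exact ih lo mid (by omega) h0 h1 hw (by omega)
      · simp only [hw, decide_false]
        exact ih (mid + 1) hi (by omega) (by omega) (by omega) h2 h3
    · simp [h]; omega

-- ===== VERDICT (by name: the statement is the Claim_ definition above) =====
theorem make_bool_spec : Claim_equal_make_bool := by
  intro l _
  unfold Spec_make_bool make_bool make_bool_alt
  have hcount : l.count true + l.count false = l.length := by
    have := List.length_eq_countP_add_countP (fun b => b = true) (l := l)
    simpa [List.count, List.countP_eq_length_filter] using this.symm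
  have hbs := pv_bs_spec (l.count false) (l.count true)
      (l.count false + l.count true) 0 ((l.count false : Int) + (l.count true : Int))
      (by omega) (by omega) (by omega) (by omega) (by omega)
  simp only [pv_fold_pair, pv_sorted_eq, List.length_append, List.length_replicate,
    Nat.cast_add, hbs]
  simp
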